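-- pv_equiv track=rewrite | github.com/sdbook-gh/Development | python/process_clangformat.py | sort_yaml_by_reference
-- ===== SOURCE A (Python) =====
-- def sort_yaml_by_reference(reference_yaml, target_yaml):
--   # Get the order of keys from reference yaml
--   reference_keys = list(reference_yaml.keys())
--
--   # Create a new ordered dictionary based on reference keys
--   sorted_yaml = {}
--   for key in reference_keys:
--     if key in target_yaml:
--       sorted_yaml[key] = target_yaml[key]
--
--   # Add any remaining keys that weren't in reference
--   for key in target_yaml:
--     if key not in sorted_yaml:
--       sorted_yaml[key] = target_yaml[key]
--
--   return sorted_yaml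
-- ===== SOURCE B (Python) =====
-- def sort_yaml_by_reference(reference_yaml, target_yaml):
--   # Rank each reference key by its position; keys absent from reference rank last.
--   ref_index = {k: i for i, k in enumerate(reference_yaml)}
--   absent = len(ref_index)
--   # Stable sort keeps the original target order among keys absent from reference.
--   ordered = sorted(target_yaml, key=lambda k: ref_index.get(k, absent))
--   return {k: target_yaml[k] for k in ordered}
-- ===== Notes on version B (the rewrite author's own statement) =====
-- stated objective: idiomatic
-- what changed: Replaces the two membership-scanning loops that grow a dict with a rank table built from the reference plus one stable sort of the target keys by that rank (absent keys rank last, keeping their target order), then a single dict comprehension.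
import Mathlib
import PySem

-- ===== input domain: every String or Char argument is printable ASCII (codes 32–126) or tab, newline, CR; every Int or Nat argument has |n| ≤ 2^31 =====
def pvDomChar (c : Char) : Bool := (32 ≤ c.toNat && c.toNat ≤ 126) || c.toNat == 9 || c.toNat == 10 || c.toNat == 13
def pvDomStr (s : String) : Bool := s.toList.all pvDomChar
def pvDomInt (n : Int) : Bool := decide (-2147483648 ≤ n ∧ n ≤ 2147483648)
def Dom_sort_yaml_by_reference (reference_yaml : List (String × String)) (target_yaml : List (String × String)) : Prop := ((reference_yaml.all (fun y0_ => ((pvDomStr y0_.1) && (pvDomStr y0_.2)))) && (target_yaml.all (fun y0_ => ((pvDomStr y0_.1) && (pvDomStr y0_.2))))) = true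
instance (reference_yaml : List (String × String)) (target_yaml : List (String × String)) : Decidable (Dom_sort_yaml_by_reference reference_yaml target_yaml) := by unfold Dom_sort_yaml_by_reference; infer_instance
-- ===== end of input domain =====

-- B replaces A's two membership-scanning loops by a rank table over the reference keys
-- plus one stable sort of the target keys by rank (idiomatic decorate-and-sort; not faster).

-- ===== PORT A =====
-- Two loops growing a dict: first the reference keys present in the target, then the
-- remaining target keys.  target_yaml[key] is guarded by membership, so getD is exact.
def sort_yaml_by_reference (reference_yaml : List (String × String)) (target_yaml : List (String × String)) : List (String × String) :=
  let tgtDict : PySem.Dict String String := PySem.Dict.mk target_yaml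
  let reference_keys := (PySem.Dict.mk reference_yaml).keys
  let sorted1 := reference_keys.foldl
    (fun acc k => if tgtDict.contains k then acc.insert k (tgtDict.getD k "") else acc)
    PySem.Dict.empty
  let sorted2 := tgtDict.keys.foldl
    (fun acc k => if acc.contains k then acc else acc.insert k (tgtDict.getD k "")) sorted1
  sorted2.items

-- ===== PORT B =====
-- Rank table from the reference, one stable sort of the target keys by rank (absent keys
-- rank last), then one dict comprehension; target_yaml[k] on sorted keys is exact as getD.
def sort_yaml_by_reference_alt (reference_yaml : List (String × String)) (target_yaml : List (String × String)) : List (String × String) :=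
  let tgtDict : PySem.Dict String String := PySem.Dict.mk target_yaml
  let ref_index := (PySem.List.enumerate (PySem.Dict.mk reference_yaml).keys 0).foldl
    (fun d p => d.insert p.2 p.1) PySem.Dict.empty
  let absent : Int := ref_index.size
  let ordered := PySem.List.sorted tgtDict.keys (fun k => ref_index.getD k absent) false
  (ordered.foldl (fun d k => d.insert k (tgtDict.getD k "")) PySem.Dict.empty).items

-- ===== PRECONDITION & SPEC =====
-- Both parameters are Python dicts; a dict cannot hold duplicate keys, so Pre_ only states
-- that each association list has pairwise-distinct keys (it excludes no real Python input).
def Pre_sort_yaml_by_reference (reference_yaml : List (String × String)) (target_yaml : List (String × String)) : Prop :=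
  (reference_yaml.map Prod.fst).Nodup ∧ (target_yaml.map Prod.fst).Nodup
instance (reference_yaml : List (String × String)) (target_yaml : List (String × String)) : Decidable (Pre_sort_yaml_by_reference reference_yaml target_yaml) := by unfold Pre_sort_yaml_by_reference; infer_instance

def pvWitness_sort_yaml_by_reference : (List (String × String)) × (List (String × String)) :=
  ([("a", "1"), ("c", "2")], [("b", "3"), ("c", "4")])

def Spec_sort_yaml_by_reference (reference_yaml : List (String × String)) (target_yaml : List (String × String)) (out : List (String × String)) : Prop := out = sort_yaml_by_reference_alt reference_yaml target_yaml
instance (reference_yaml : List (String × String)) (target_yaml : List (String × String)) (out : List (String × String)) : Decidable (Spec_sort_yaml_by_reference reference_yaml target_yaml out) := by unfold Spec_sort_yaml_by_reference; infer_instance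

-- ===== CLAIM (what is proved, stated in full; the proofs are below) =====
def Claim_equal_sort_yaml_by_reference : Prop := ∀ (reference_yaml : List (String × String)) (target_yaml : List (String × String)), Dom_sort_yaml_by_reference reference_yaml target_yaml → Pre_sort_yaml_by_reference reference_yaml target_yaml → Spec_sort_yaml_by_reference reference_yaml target_yaml (sort_yaml_by_reference reference_yaml target_yaml)

-- ===== LEMMAS AND PROOFS =====

-- rank of a key: its position in the reference key list, or the list's length if absent
def pvRnk (R : List String) (k : String) : Int :=
  match PySem.List.index? R k with
  | some i => (i : Int)
  | none => (R.length : Int)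

lemma pvRnk_of_not_mem {R : List String} {k : String} (h : k ∉ R) :
    pvRnk R k = (R.length : Int) := by
  unfold pvRnk
  rw [(PySem.List.index?_eq_none_iff R k).2 h]

lemma pvRnk_le (R : List String) (k : String) : pvRnk R k ≤ (R.length : Int) := by
  unfold pvRnk
  cases h : PySem.List.index? R k with
  | none => simp
  | some i =>
    obtain ⟨hk, -, -⟩ := PySem.List.getElem_of_index?_eq_some h
    simp only []
    exact_mod_cast hk.le

lemma pvRnk_lt_iff (R : List String) (k : String) :
    pvRnk R k < (R.length : Int) ↔ k ∈ R := by
  constructor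
  · intro hlt
    by_contra hmem
    rw [pvRnk_of_not_mem hmem] at hlt
    omega
  · intro hmem
    unfold pvRnk
    cases h : PySem.List.index? R k with
    | none => exact absurd ((PySem.List.index?_eq_none_iff R k).1 h) (by simp [hmem])
    | some i =>
      obtain ⟨hk, -, -⟩ := PySem.List.getElem_of_index?_eq_some h
      simp only []
      exact_mod_cast hk

lemma pvRnk_getElem {l : List String} (h : l.Nodup) {i : Nat} (hi : i < l.length) :
    pvRnk l l[i] = (i : Int) := by
  unfold pvRnk
  cases hidx : PySem.List.index? l l[i] with
  | none => exact absurd ((PySem.List.index?_eq_none_iff l l[i]).1 hidx) (by simp)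
  | some j =>
    obtain ⟨hj, hje, -⟩ := PySem.List.getElem_of_index?_eq_some hidx
    have : j = i := (List.Nodup.getElem_inj_iff h (hi := hj) (hj := hi)).1 hje
    simp [this]

lemma pvPairwise_rnk {R : List String} (h : R.Nodup) :
    R.Pairwise (fun a b => pvRnk R a < pvRnk R b) := by
  rw [List.pairwise_iff_getElem]
  intro i j hi hj hij
  rw [pvRnk_getElem h hi, pvRnk_getElem h hj]
  exact_mod_cast hij

-- the rank dictionary built from enumerate(reference): lookup and size
lemma pvRankDict_getD (R : List String) (hR : R.Nodup) (k : String) (d0 : Int) :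
    (((PySem.List.enumerate R 0).foldl (fun d p => d.insert p.2 p.1) PySem.Dict.empty).getD k d0)
      = if k ∈ R then pvRnk R k else d0 := by
  induction R using List.reverseRecOn with
  | nil => simp [PySem.List.enumerate]
  | append_singleton R x ih =>
    rw [List.nodup_append] at hR
    obtain ⟨hR1, -, hx⟩ := hR
    have hxR : x ∉ R := fun hm => hx x hm x (by simp) rfl
    rw [PySem.List.enumerate_append, List.foldl_append]
    simp only [PySem.List.enumerate, List.foldl_cons, List.foldl_nil]
    rw [PySem.Dict.getD_insert]
    by_cases hk : k = x
    · subst hk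
      rw [if_pos rfl, if_pos (by simp)]
      unfold pvRnk
      rw [PySem.List.index?_append_singleton_self R k hxR]
      simp
    · rw [if_neg hk, ih hR1]
      by_cases hm : k ∈ R
      · rw [if_pos hm, if_pos (by simp [hm])]
        unfold pvRnk
        rw [PySem.List.index?_append_of_mem [x] hm]
        cases hidx : PySem.List.index? R k with
        | none => exact absurd ((PySem.List.index?_eq_none_iff R k).1 hidx) (by simp [hm])
        | some i => rfl
      · rw [if_neg hm, if_neg (by simp [hm, hk])]

lemma pvRankDict_size (R : List String) (hR : R.Nodup) :
    (((PySem.List.enumerate R 0).foldl (fun d p => d.insert p.2 p.1)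
        (PySem.Dict.empty : PySem.Dict String Int)).size) = R.length := by
  have hk : (((PySem.List.enumerate R 0).foldl (fun d p => d.insert p.2 p.1)
      (PySem.Dict.empty : PySem.Dict String Int)).keys) = R := by
    rw [PySem.Dict.keys_foldl_insert_key (PySem.List.enumerate R 0) (fun p => p.2) (fun _ p => p.1)]
    rw [PySem.List.map_snd_enumerate]
    show PySem.Set.update (PySem.Dict.empty : PySem.Dict String Int).keys R = R
    rw [PySem.Dict.keys_empty]
    show PySem.Set.ofList R = R
    exact PySem.Set.ofList_eq_self_of_nodup R hR
  have h2 := congrArg List.length hk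
  simpa [PySem.Dict.keys, PySem.Dict.size] using h2

-- insertBy over a list whose tail all compares after x
lemma pvInsertBy_append (before : String → String → Bool) (x : String) (ys zs : List String)
    (h : ∀ z ∈ zs, before x z = true) :
    PySem.List.insertBy before x (ys ++ zs) = PySem.List.insertBy before x ys ++ zs := by
  induction ys with
  | nil =>
    cases zs with
    | nil => simp
    | cons z zs' => simp [PySem.List.insertBy, h z (by simp)]
  | cons y ys ih =>
    by_cases hb : before x y = true <;> simp [PySem.List.insertBy, hb, ih]

-- stability, specialised: keys below the bound sort ahead (by key), keys at the bound keep order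
lemma pvSorted_split (key : String → Int) (n : Int) (xs : List String)
    (h : ∀ x ∈ xs, key x ≤ n) :
    PySem.List.sorted xs key false =
      PySem.List.sorted (xs.filter (fun x => decide (key x < n))) key false
        ++ xs.filter (fun x => !decide (key x < n)) := by
  induction xs using List.reverseRecOn with
  | nil => simp [PySem.List.sorted_eq_foldl_insertBy]
  | append_singleton xs x ih =>
    have hxs : ∀ y ∈ xs, key y ≤ n := fun y hy => h y (by simp [hy])
    have hx : key x ≤ n := h x (by simp)
    rw [PySem.List.sorted_eq_foldl_insertBy (xs ++ [x]) key, List.foldl_append,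
      ← PySem.List.sorted_eq_foldl_insertBy xs key, ih hxs]
    simp only [List.foldl_cons, List.foldl_nil, List.filter_append, List.filter_cons,
      List.filter_nil]
    by_cases hlt : key x < n
    · simp only [hlt, decide_true, if_pos, Bool.not_true, List.append_nil,
        Bool.false_eq_true, ite_false]
      rw [pvInsertBy_append _ x _ _ ?_]
      · rw [PySem.List.sorted_eq_foldl_insertBy (List.filter (fun x => decide (key x < n)) xs ++ [x]) key,
          List.foldl_append, ← PySem.List.sorted_eq_foldl_insertBy]
        simp
      · intro z hz
        rw [List.mem_filter] at hz
        have hzn : key z ≤ n := hxs z hz.1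
        have : ¬ key z < n := by simpa using hz.2
        simp only [decide_eq_true_eq]
        omega
    · have hxn : key x = n := by omega
      simp only [hlt, decide_false, Bool.not_false, if_pos]
      rw [PySem.List.insertBy_of_forall_not_before _ x _ ?_]
      · simp
      · intro y hy
        have hyn : key y ≤ n := by
          rcases List.mem_append.1 hy with h1 | h2
          · rw [PySem.List.mem_sorted] at h1
            exact hxs y (List.mem_filter.1 h1).1
          · exact hxs y (List.mem_filter.1 h2).1
        simp only [decide_eq_false_iff_not]
        omega

-- loop 2 of A: the membership test against the growing dict is a fixed predicate
lemma pvLoop2 (g : String → String) (P : String → Bool) :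
    ∀ (l : List String) (d : PySem.Dict String String), l.Nodup →
      (∀ k ∈ l, d.contains k = P k) →
      l.foldl (fun acc k => if acc.contains k then acc else acc.insert k (g k)) d
        = (l.filter (fun k => !P k)).foldl (fun acc k => acc.insert k (g k)) d := by
  intro l
  induction l with
  | nil => intro d _ _; simp
  | cons k rest ih =>
    intro d hnd hP
    have hk : d.contains k = P k := hP k (by simp)
    rw [List.nodup_cons] at hnd
    simp only [List.foldl_cons, List.filter_cons]
    by_cases hPk : P k = true
    · simp only [hPk, Bool.not_true, if_pos, hk, Bool.false_eq_true, ite_false]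
      exact ih d hnd.2 (fun k' hk' => hP k' (by simp [hk']))
    · have hPk' : P k = false := by simpa using hPk
      simp only [hPk', Bool.not_false, hk, Bool.false_eq_true, ite_false, ite_true]
      rw [List.foldl_cons]
      refine ih _ hnd.2 (fun k' hk' => ?_)
      rw [PySem.Dict.contains_insert]
      have : k' ≠ k := fun he => hnd.1 (he ▸ hk')
      simp [this, hP k' (by simp [hk'])]

theorem pv_main (reference_yaml target_yaml : List (String × String))
    (hR : (reference_yaml.map Prod.fst).Nodup) (hT : (target_yaml.map Prod.fst).Nodup) :
    sort_yaml_by_reference reference_yaml target_yaml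
      = sort_yaml_by_reference_alt reference_yaml target_yaml := by
  classical
  unfold sort_yaml_by_reference sort_yaml_by_reference_alt
  simp only [PySem.Dict.keys_mk]
  set tgt : PySem.Dict String String := PySem.Dict.mk target_yaml with htgt
  set R : List String := reference_yaml.map (fun x => x.1) with hRdef
  set T : List String := target_yaml.map (fun x => x.1) with hTdef
  set g : String → String := fun k => tgt.getD k "" with hg
  have hRnd : R.Nodup := hR
  have hTnd : T.Nodup := hT
  have hTkeys : tgt.keys = T := rfl
  have hcont_tgt : ∀ k, tgt.contains k = decide (k ∈ T) := fun k => by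
    rw [PySem.Dict.contains_eq_decide_mem_keys, hTkeys]
  set F1 : List String := R.filter (fun k => tgt.contains k) with hF1
  set F2 : List String := T.filter (fun k => !decide (k ∈ R)) with hF2
  have hF1nd : F1.Nodup := hRnd.filter _
  have hF2nd : F2.Nodup := hTnd.filter _
  have hF1sub : ∀ a ∈ F1, a ∈ R ∧ a ∈ T := by
    intro a ha
    rw [hF1, List.mem_filter, hcont_tgt] at ha
    exact ⟨ha.1, by simpa using ha.2⟩
  have hF2sub : ∀ a ∈ F2, a ∈ T ∧ a ∉ R := by
    intro a ha
    rw [hF2, List.mem_filter] at ha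
    exact ⟨ha.1, by simpa using ha.2⟩
  have hmemF1 : ∀ a, a ∈ F1 ↔ a ∈ R ∧ a ∈ T := by
    intro a
    refine ⟨hF1sub a, fun ⟨h1, h2⟩ => ?_⟩
    rw [hF1, List.mem_filter, hcont_tgt]
    exact ⟨h1, by simpa using h2⟩
  -- ===== side A =====
  rw [PySem.List.foldl_if_eq_foldl_filter (fun k => tgt.contains k)
    (fun acc k => acc.insert k (g k)) R PySem.Dict.empty]
  have h1items : (F1.foldl (fun acc k => acc.insert k (g k)) PySem.Dict.empty).items
      = F1.map (fun k => (k, g k)) := by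
    rw [PySem.Dict.items_foldl_insert_fresh F1 (fun a => a) g PySem.Dict.empty
      (fun a _ => PySem.Dict.contains_empty a) (by simpa using hF1nd)]
    rfl
  have hkeys1 : (F1.foldl (fun acc k => acc.insert k (g k)) PySem.Dict.empty).keys = F1 := by
    show ((F1.foldl (fun acc k => acc.insert k (g k)) PySem.Dict.empty).items).map (fun x => x.1) = F1
    rw [h1items, List.map_map]
    simp [Function.comp_def]
  have hcont1 : ∀ k, (F1.foldl (fun acc k => acc.insert k (g k)) PySem.Dict.empty).contains k
      = decide (k ∈ F1) := fun k => by
    rw [PySem.Dict.contains_eq_decide_mem_keys, hkeys1]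
  rw [← hF1]
  rw [pvLoop2 g (fun k => decide (k ∈ F1)) T _ hTnd (fun k _ => hcont1 k)]
  have hfilt2 : T.filter (fun k => !decide (k ∈ F1)) = F2 := by
    rw [hF2]
    refine List.filter_congr (fun k hk => ?_)
    simp only [Bool.not_eq_eq_eq_not, Bool.not_not, decide_eq_decide]
    rw [hmemF1 k]
    simp [hk]
  rw [hfilt2]
  rw [PySem.Dict.items_foldl_insert_fresh F2 (fun a => a) g _
    (fun a ha => by rw [hcont1 a]; simp only [decide_eq_false_iff_not]; rw [hmemF1 a]
                    exact fun hc => (hF2sub a ha).2 hc.1)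
    (by simpa using hF2nd)]
  rw [h1items]
  -- ===== side B =====
  have habs := pvRankDict_size R hRnd
  have hkey : (fun k => (((PySem.List.enumerate R 0).foldl (fun d p => d.insert p.2 p.1)
      (PySem.Dict.empty : PySem.Dict String Int)).getD k
        ((((PySem.List.enumerate R 0).foldl (fun d p => d.insert p.2 p.1)
          (PySem.Dict.empty : PySem.Dict String Int)).size : Nat) : Int))) = pvRnk R := by
    funext k
    rw [pvRankDict_getD R hRnd k _, habs]
    by_cases hm : k ∈ R
    · rw [if_pos hm]
    · rw [if_neg hm, pvRnk_of_not_mem hm]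
  rw [hkey]
  rw [pvSorted_split (pvRnk R) (R.length : Int) T (fun k _ => pvRnk_le R k)]
  have hlow : T.filter (fun k => decide (pvRnk R k < (R.length : Int)))
      = T.filter (fun k => decide (k ∈ R)) :=
    List.filter_congr (fun k _ => by simp [pvRnk_lt_iff])
  have hhigh : T.filter (fun k => !decide (pvRnk R k < (R.length : Int))) = F2 := by
    rw [hF2]
    exact List.filter_congr (fun k _ => by simp [pvRnk_lt_iff])
  rw [hlow, hhigh]
  have hsorted : PySem.List.sorted (T.filter (fun k => decide (k ∈ R))) (pvRnk R) = F1 := by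
    refine PySem.List.sorted_eq_of_perm_of_pairwise_lt _ F1 (pvRnk R) ?_ ?_
    · rw [List.perm_ext_iff_of_nodup hF1nd (hTnd.filter _)]
      intro a
      rw [hmemF1 a, List.mem_filter]
      simp [and_comm]
    · exact (pvPairwise_rnk hRnd).sublist List.filter_sublist
  rw [hsorted]
  rw [PySem.Dict.items_foldl_insert_fresh (F1 ++ F2) (fun a => a) g PySem.Dict.empty
    (fun a _ => PySem.Dict.contains_empty a) ?_]
  · simp [PySem.Dict.empty]
  · simp only [List.map_id']
    rw [List.nodup_append]
    exact ⟨hF1nd, hF2nd, fun a ha b hb => fun he => (hF2sub b hb).2 (he ▸ (hF1sub a ha).1)⟩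

-- ===== VERDICT (by name: the statement is the Claim_ definition above) =====
theorem sort_yaml_by_reference_spec : Claim_equal_sort_yaml_by_reference := by
  intro r t _ hpre
  exact pv_main r t hpre.1 hpre.2
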